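-- pv_equiv track=rewrite | github.com/jasonhenline/project_euler | problem004/solution.py | is_product_of_two_three_digit_numbers
-- ===== SOURCE A (Python) =====
-- def is_product_of_two_three_digit_numbers(n: int) -> bool:
--     for d in range(100, 1000):
--         q, r = divmod(n, d)
--         if r == 0 and 100 <= q < 1000:
--             return True
--         if q < 100:
--             return False
--     return False
-- ===== SOURCE B (Python) =====
-- def is_product_of_two_three_digit_numbers(n: int) -> bool:
--     # Enumerate products of ordered pairs of three-digit factors by multiplication only,
--     # in increasing order per row, pruning once products exceed n.
--     for a in range(100, 1000):
--         if a * a > n: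
--             break
--         for b in range(a, 1000):
--             p = a * b
--             if p == n:
--                 return True
--             if p > n:
--                 break
--     return False
-- ===== Notes on version B (the rewrite author's own statement) =====
-- stated objective: alternative
-- what changed: B never divides: it enumerates candidate products of an ordered pair of three-digit factors by multiplication, in increasing order per row, pruning a row as soon as its square or current product exceeds n, whereas A trial-divides n by every three-digit d with divmod and a quotient-based early exit.
import Mathlib
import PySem

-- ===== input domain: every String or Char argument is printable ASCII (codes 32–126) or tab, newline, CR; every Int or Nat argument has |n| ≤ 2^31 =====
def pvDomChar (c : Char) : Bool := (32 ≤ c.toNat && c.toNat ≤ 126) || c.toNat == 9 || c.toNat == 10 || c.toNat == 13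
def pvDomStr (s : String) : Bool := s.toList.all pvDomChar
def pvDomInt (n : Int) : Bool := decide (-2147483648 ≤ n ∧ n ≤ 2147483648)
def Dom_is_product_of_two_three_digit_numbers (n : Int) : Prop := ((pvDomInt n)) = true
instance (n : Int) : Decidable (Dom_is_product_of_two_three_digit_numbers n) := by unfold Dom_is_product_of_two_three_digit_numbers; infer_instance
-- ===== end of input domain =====

-- B enumerates the products of ordered pairs of three-digit factors by multiplication only,
-- with monotone pruning, instead of A's trial division with divmod; alternative algorithm.

-- ===== PORT A =====
-- the 'for d in range(100, 1000)' loop, as fuel recursion (fuel = remaining range length)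
def pvALoop (n : Int) : Nat → Int → Bool
  | 0, _ => false
  | k+1, d =>
    let q := PySem.Int.floordiv n d
    let r := PySem.Int.mod n d
    if r = 0 ∧ 100 ≤ q ∧ q < 1000 then true
    else if q < 100 then false
    else pvALoop n k (d + 1)

def is_product_of_two_three_digit_numbers (n : Int) : Bool := pvALoop n 900 100

-- ===== PORT B =====
-- the inner 'for b in range(a, 1000)' loop of Source B (fuel = remaining range length)
def pvBInner (n a : Int) : Nat → Int → Bool
  | 0, _ => false
  | k+1, b =>
    let p := a * b
    if p = n then true
    else if n < p then false
    else pvBInner n a k (b + 1)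

-- the outer 'for a in range(100, 1000)' loop of Source B
def pvBOuter (n : Int) : Nat → Int → Bool
  | 0, _ => false
  | k+1, a =>
    if n < a * a then false
    else if pvBInner n a (1000 - a).toNat a then true
    else pvBOuter n k (a + 1)

def is_product_of_two_three_digit_numbers_alt (n : Int) : Bool := pvBOuter n 900 100

-- ===== PRECONDITION & SPEC =====
def Spec_is_product_of_two_three_digit_numbers (n : Int) (out : Bool) : Prop := out = is_product_of_two_three_digit_numbers_alt n
instance (n : Int) (out : Bool) : Decidable (Spec_is_product_of_two_three_digit_numbers n out) := by unfold Spec_is_product_of_two_three_digit_numbers; infer_instance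

-- ===== CLAIM (what is proved, stated in full; the proofs are below) =====
def Claim_equal_is_product_of_two_three_digit_numbers : Prop := ∀ (n : Int), Dom_is_product_of_two_three_digit_numbers n → Spec_is_product_of_two_three_digit_numbers n (is_product_of_two_three_digit_numbers n)

-- ===== LEMMAS AND PROOFS =====

-- A's success condition at divisor d
def pvCond (n d : Int) : Prop := PySem.Int.mod n d = 0 ∧ 100 ≤ PySem.Int.floordiv n d ∧ PySem.Int.floordiv n d < 1000

-- if the quotient at some positive divisor d is already < 100, it stays < 100 at every larger divisor
lemma pvQuot_mono {n d d' : Int} (hd : 0 < d) (hdd : d ≤ d')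
    (h : 100 ≤ PySem.Int.floordiv n d') : 100 ≤ PySem.Int.floordiv n d := by
  rw [PySem.Int.le_floordiv_iff_mul_le (by omega)] at h ⊢
  nlinarith

lemma pvALoop_iff (n : Int) (k : Nat) (d : Int) (hd : 0 < d) :
    pvALoop n k d = true ↔ ∃ i : Nat, i < k ∧ pvCond n (d + i) := by
  induction k generalizing d with
  | zero => simp [pvALoop]
  | succ k ih =>
    rw [pvALoop]
    split
    · rename_i h
      simp only [true_iff]
      exact ⟨0, by omega, by simpa using h⟩
    · rename_i hnc
      split
      · rename_i hq
        simp only [Bool.false_eq_true, false_iff]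
        rintro ⟨i, -, -, hc2, -⟩
        have hle : d ≤ d + (i : Int) := by
          have : (0 : Int) ≤ (i : Int) := Int.natCast_nonneg i
          omega
        have := pvQuot_mono hd hle hc2
        omega
      · rename_i hq
        rw [ih (d + 1) (by omega)]
        constructor
        · rintro ⟨i, hi, hc⟩
          refine ⟨i + 1, by omega, ?_⟩
          have he : d + ((i + 1 : Nat) : Int) = d + 1 + (i : Int) := by push_cast; ring
          rwa [he]
        · rintro ⟨i, hi, hc⟩
          match i with
          | 0 =>
            exfalso
            have he : d + ((0 : Nat) : Int) = d := by norm_num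
            rw [he] at hc
            exact hnc hc
          | i + 1 =>
            refine ⟨i, by omega, ?_⟩
            have he : d + 1 + (i : Int) = d + ((i + 1 : Nat) : Int) := by push_cast; ring
            rwa [he]

-- pvCond at a positive divisor is exactly a factorization with 3-digit quotient
lemma pvCond_factor {n d : Int} (h : pvCond n d) :
    n = d * PySem.Int.floordiv n d := by
  have := PySem.Int.floordiv_mul_add_mod n d
  rw [h.1] at this
  linarith

lemma pvCond_of_factor {n a b : Int} (ha : 0 < a) (hb1 : 100 ≤ b) (hb2 : b ≤ 999)
    (hab : n = a * b) : pvCond n a := by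
  have hq : PySem.Int.floordiv n a = b := by
    rw [PySem.Int.floordiv_eq_iff_of_pos ha]
    constructor <;> nlinarith
  exact ⟨by rw [PySem.Int.mod_eq_zero_iff_dvd]; exact ⟨b, by linarith⟩, by rw [hq]; omega, by rw [hq]; omega⟩

-- A returns true exactly on products of two 3-digit numbers
lemma pvA_iff (n : Int) :
    is_product_of_two_three_digit_numbers n = true ↔
      ∃ a b : Int, 100 ≤ a ∧ a ≤ 999 ∧ 100 ≤ b ∧ b ≤ 999 ∧ n = a * b := by
  rw [is_product_of_two_three_digit_numbers, pvALoop_iff n 900 100 (by omega)]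
  constructor
  · rintro ⟨i, hi, hc⟩
    have h0 : (0 : Int) ≤ (i : Int) := Int.natCast_nonneg i
    refine ⟨100 + i, PySem.Int.floordiv n (100 + i), by omega, by omega,
      hc.2.1, by have := hc.2.2; omega, pvCond_factor hc⟩
  · rintro ⟨a, b, ha1, ha2, hb1, hb2, hab⟩
    refine ⟨(a - 100).toNat, by omega, ?_⟩
    have he : (100 : Int) + ((a - 100).toNat : Int) = a := by omega
    rw [he]
    exact pvCond_of_factor (by omega) hb1 hb2 hab

-- the inner loop finds b with a ≤ b and a*b = n (pruning sound since a > 0)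
lemma pvBInner_iff (n a : Int) (ha : 0 < a) (k : Nat) (b : Int) :
    pvBInner n a k b = true ↔ ∃ i : Nat, i < k ∧ n = a * (b + i) := by
  induction k generalizing b with
  | zero => simp [pvBInner]
  | succ k ih =>
    rw [pvBInner]
    split
    · rename_i h
      simp only [true_iff]
      exact ⟨0, by omega, by simpa using h.symm⟩
    · rename_i hne
      split
      · rename_i hgt
        simp only [Bool.false_eq_true, false_iff]
        rintro ⟨i, -, hn⟩
        have h0 : (0 : Int) ≤ (i : Int) := Int.natCast_nonneg i
        nlinarith
      · rename_i hle
        rw [ih (b + 1)]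
        constructor
        · rintro ⟨i, hi, hn⟩
          refine ⟨i + 1, by omega, ?_⟩
          have he : b + ((i + 1 : Nat) : Int) = b + 1 + (i : Int) := by push_cast; ring
          rwa [he]
        · rintro ⟨i, hi, hn⟩
          match i with
          | 0 =>
            exfalso
            have he : b + ((0 : Nat) : Int) = b := by norm_num
            rw [he] at hn
            exact hne hn.symm
          | i + 1 =>
            refine ⟨i, by omega, ?_⟩
            have he : b + 1 + (i : Int) = b + ((i + 1 : Nat) : Int) := by push_cast; ring
            rwa [he]

-- the inner loop as run by the outer loop: a hit is exactly an ordered factorization at a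
lemma pvBInner_run_iff (n a : Int) (ha : 0 < a) :
    pvBInner n a (1000 - a).toNat a = true ↔ ∃ b : Int, a ≤ b ∧ b ≤ 999 ∧ n = a * b := by
  rw [pvBInner_iff n a ha]
  constructor
  · rintro ⟨i, hi, hn⟩
    have h0 : (0 : Int) ≤ (i : Int) := Int.natCast_nonneg i
    have hi' : (i : Int) < 1000 - a := by omega
    exact ⟨a + i, by omega, by omega, hn⟩
  · rintro ⟨b, hab, hb, hn⟩
    refine ⟨(b - a).toNat, by omega, ?_⟩
    have he : a + ((b - a).toNat : Int) = b := by omega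
    rwa [he]

-- the outer loop (pruning a*a > n sound since factors are ≥ a > 0)
lemma pvBOuter_iff (n : Int) (k : Nat) (a : Int) (ha : 0 < a) :
    pvBOuter n k a = true ↔
      ∃ i : Nat, i < k ∧ ∃ b : Int, a + i ≤ b ∧ b ≤ 999 ∧ n = (a + i) * b := by
  induction k generalizing a with
  | zero => simp [pvBOuter]
  | succ k ih =>
    rw [pvBOuter]
    split
    · rename_i hbrk
      simp only [Bool.false_eq_true, false_iff]
      rintro ⟨i, -, b, hab, -, hn⟩
      have h0 : (0 : Int) ≤ (i : Int) := Int.natCast_nonneg i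
      nlinarith
    · rename_i hge
      split
      · rename_i hhit
        simp only [true_iff]
        obtain ⟨b, hab, hb, hn⟩ := (pvBInner_run_iff n a ha).mp hhit
        exact ⟨0, by omega, b, by simpa using hab, hb, by simpa using hn⟩
      · rename_i hmiss
        rw [ih (a + 1) (by omega)]
        constructor
        · rintro ⟨i, hi, b, hab, hb, hn⟩
          have he : a + ((i + 1 : Nat) : Int) = a + 1 + (i : Int) := by push_cast; ring
          exact ⟨i + 1, by omega, b, by rw [he]; exact hab, hb, by rw [he]; exact hn⟩
        · rintro ⟨i, hi, b, hab, hb, hn⟩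
          match i with
          | 0 =>
            exfalso
            have he : a + ((0 : Nat) : Int) = a := by norm_num
            rw [he] at hab hn
            exact hmiss ((pvBInner_run_iff n a ha).mpr ⟨b, hab, hb, hn⟩)
          | i + 1 =>
            have he : a + ((i + 1 : Nat) : Int) = a + 1 + (i : Int) := by push_cast; ring
            rw [he] at hab hn
            exact ⟨i, by omega, b, hab, hb, hn⟩

-- B returns true exactly on products a*b with 100 ≤ a ≤ b ≤ 999
lemma pvB_iff (n : Int) :
    is_product_of_two_three_digit_numbers_alt n = true ↔
      ∃ a b : Int, 100 ≤ a ∧ a ≤ b ∧ b ≤ 999 ∧ n = a * b := by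
  rw [is_product_of_two_three_digit_numbers_alt, pvBOuter_iff n 900 100 (by omega)]
  constructor
  · rintro ⟨i, hi, b, hab, hb, hn⟩
    have h0 : (0 : Int) ≤ (i : Int) := Int.natCast_nonneg i
    exact ⟨100 + i, b, by omega, hab, hb, hn⟩
  · rintro ⟨a, b, ha, hab, hb, hn⟩
    have he : (100 : Int) + ((a - 100).toNat : Int) = a := by omega
    exact ⟨(a - 100).toNat, by omega, b, by rw [he]; exact hab, hb, by rw [he]; exact hn⟩

-- ===== VERDICT (by name: the statement is the Claim_ definition above) =====
theorem is_product_of_two_three_digit_numbers_spec : Claim_equal_is_product_of_two_three_digit_numbers := by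
  intro n _
  unfold Spec_is_product_of_two_three_digit_numbers
  rw [Bool.eq_iff_iff, pvA_iff, pvB_iff]
  constructor
  · rintro ⟨a, b, ha1, ha2, hb1, hb2, hn⟩
    rcases le_total a b with h | h
    · exact ⟨a, b, ha1, h, hb2, hn⟩
    · exact ⟨b, a, hb1, h, ha2, by linarith [mul_comm a b]⟩
  · rintro ⟨a, b, ha, hab, hb, hn⟩
    exact ⟨a, b, ha, by omega, by omega, hb, hn⟩
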